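-- pv_equiv track=rewrite | github.com/svgbogdnn/Agents-Week-ya | SAD/a.py | longliveDrizzy
-- ===== SOURCE A (Python) =====
-- def longliveDrizzy(n, rival):
--     suf = []
--     i = 0
--     while i <= n:
--         suf.append([0, 0, 0])
--         i = i + 1
--
--     pos = n - 1
--     while pos >= 0:
--         suf[pos][0] = suf[pos + 1][0]
--         suf[pos][1] = suf[pos + 1][1]
--         suf[pos][2] = suf[pos + 1][2]
--
--         ch = rival[pos]
--         if ch == 'a':
--             suf[pos][0] = suf[pos][0] + 1
--         elif ch == 'b':
--             suf[pos][1] = suf[pos][1] + 1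
--         else:
--             suf[pos][2] = suf[pos][2] + 1
--
--         pos = pos - 1
--
--     return suf
-- ===== SOURCE B (Python) =====
-- def longliveDrizzy(n, rival):
--     if n < 0:
--         return []
--     def idx(ch):
--         if ch == 'a':
--             return 0
--         if ch == 'b':
--             return 1
--         return 2
--     prefix = rival[:n]
--     tot = [0, 0, 0]
--     for ch in prefix:
--         tot[idx(ch)] += 1
--     out = []
--     for ch in prefix:
--         out.append(tot.copy())
--         tot[idx(ch)] -= 1
--     out.append([0, 0, 0])
--     return out
-- ===== Notes on version B (the rewrite author's own statement) =====
-- stated objective: alternative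
-- what changed: A preallocates an (n+1)-row table and fills it by a backward in-place pass copying suf[pos+1] into suf[pos] and bumping one slot; B counts 'a'/'b'/other over rival[:n] once, then emits the rows front-to-back from a decrementing running total, appending the final zero row.
import Mathlib
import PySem

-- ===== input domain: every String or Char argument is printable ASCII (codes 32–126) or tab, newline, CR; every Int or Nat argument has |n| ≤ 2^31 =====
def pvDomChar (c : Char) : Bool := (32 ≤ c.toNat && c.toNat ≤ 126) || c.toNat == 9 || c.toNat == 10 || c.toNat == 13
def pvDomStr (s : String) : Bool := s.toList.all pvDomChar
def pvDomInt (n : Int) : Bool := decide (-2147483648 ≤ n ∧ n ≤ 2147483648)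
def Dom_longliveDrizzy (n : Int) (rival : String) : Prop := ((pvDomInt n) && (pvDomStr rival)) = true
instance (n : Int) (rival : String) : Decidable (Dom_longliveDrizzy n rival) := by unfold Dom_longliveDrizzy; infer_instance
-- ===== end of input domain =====

-- B replaces A's backward in-place pass over a preallocated table by: count 'a'/'b'/other over rival[:n] once,
-- then emit each suffix row front-to-back while decrementing the running totals (alternative decomposition, same O(n)).

-- ===== PORT A =====
-- while pos >= 0: copy suf[pos+1] into suf[pos], bump the matching slot, pos -= 1
def longliveDrizzyStep (rival : String) (suf : List (List Int)) (pos : Int) : List (List Int) :=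
  let r1 := PySem.List.pyGetD suf (pos + 1) []
  let row := [PySem.List.pyGetD r1 0 0, PySem.List.pyGetD r1 1 0, PySem.List.pyGetD r1 2 0]
  let ch := (PySem.Str.pyGet? rival pos).getD ' '
  let row :=
    if ch = 'a' then PySem.List.pySetD row 0 (PySem.List.pyGetD row 0 0 + 1)
    else if ch = 'b' then PySem.List.pySetD row 1 (PySem.List.pyGetD row 1 0 + 1)
    else PySem.List.pySetD row 2 (PySem.List.pyGetD row 2 0 + 1)
  PySem.List.pySetD suf pos row

def longliveDrizzy (n : Int) (rival : String) : List (List Int) :=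
  -- i = 0; while i <= n: suf.append([0,0,0]); i += 1
  let suf := (PySem.List.pyRange 0 (n + 1) 1).foldl (fun acc _ => acc ++ [[0, 0, 0]]) []
  -- pos = n-1; while pos >= 0: … ; pos -= 1
  (PySem.List.pyRange (n - 1) (-1) (-1)).foldl (longliveDrizzyStep rival) suf

-- ===== PORT B =====
def bIdx (ch : Char) : Int := if ch = 'a' then 0 else if ch = 'b' then 1 else 2

def longliveDrizzy_alt (n : Int) (rival : String) : List (List Int) :=
  if n < 0 then []
  else
    let pre := PySem.List.slice rival.toList none (some n)     -- rival[:n]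
    let tot := pre.foldl
      (fun t ch => PySem.List.pySetD t (bIdx ch) (PySem.List.pyGetD t (bIdx ch) 0 + 1)) [0, 0, 0]
    let st := pre.foldl
      (fun (st : List Int × List (List Int)) ch =>
        (PySem.List.pySetD st.1 (bIdx ch) (PySem.List.pyGetD st.1 (bIdx ch) 0 - 1), st.2 ++ [st.1]))
      (tot, [])
    st.2 ++ [[0, 0, 0]]

-- ===== PRECONDITION & SPEC =====
-- A raises IndexError (rival[pos]) iff 0 ≤ n-1 and n-1 ≥ len(rival); Pre_ excludes exactly that.
def Pre_longliveDrizzy (n : Int) (rival : String) : Prop := n ≤ PySem.Str.len rival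
instance (n : Int) (rival : String) : Decidable (Pre_longliveDrizzy n rival) := by unfold Pre_longliveDrizzy; infer_instance
def pvWitness_longliveDrizzy : Int × String := (2, "ab")

def Spec_longliveDrizzy (n : Int) (rival : String) (out : List (List Int)) : Prop := out = longliveDrizzy_alt n rival
instance (n : Int) (rival : String) (out : List (List Int)) : Decidable (Spec_longliveDrizzy n rival out) := by unfold Spec_longliveDrizzy; infer_instance

-- ===== CLAIM (what is proved, stated in full; the proofs are below) =====
def Claim_equal_longliveDrizzy : Prop := ∀ (n : Int) (rival : String), Dom_longliveDrizzy n rival → Pre_longliveDrizzy n rival → Spec_longliveDrizzy n rival (longliveDrizzy n rival)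

-- ===== LEMMAS AND PROOFS =====

-- the three counters as pure functions, and the intended suffix table
def cntA (L : List Char) : Int := (L.countP (· == 'a') : Int)
def cntB (L : List Char) : Int := (L.countP (· == 'b') : Int)
def cntC (L : List Char) : Int := (L.countP (fun c => c != 'a' && c != 'b') : Int)
def row3 (L : List Char) : List Int := [cntA L, cntB L, cntC L]
def sfx (L : List Char) : List (List Int) := L.tails.map row3

theorem sfx_nil : sfx [] = [[0, 0, 0]] := by simp [sfx, row3, cntA, cntB, cntC]

theorem sfx_cons (c : Char) (cs : List Char) : sfx (c :: cs) = row3 (c :: cs) :: sfx cs := by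
  simp [sfx]

theorem row3_cons (c : Char) (cs : List Char) :
    row3 (c :: cs) =
      if c = 'a' then [cntA cs + 1, cntB cs, cntC cs]
      else if c = 'b' then [cntA cs, cntB cs + 1, cntC cs]
      else [cntA cs, cntB cs, cntC cs + 1] := by
  simp only [row3, cntA, cntB, cntC, List.countP_cons]
  by_cases ha : c = 'a' <;> by_cases hb : c = 'b' <;> simp_all

theorem sfx_getD_zero (L : List Char) (d : List Int) : (sfx L).getD 0 d = row3 L := by
  cases L <;> simp [sfx_nil, sfx_cons, row3, cntA, cntB, cntC]

theorem set_replicate_last (z v : List Int) (k : Nat) :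
    (List.replicate (k + 1) z).set k v = List.replicate k z ++ [v] := by
  induction k with
  | zero => simp
  | succ m ih => rw [List.replicate_succ, List.set_cons_succ, ih]; simp [List.replicate_succ]

-- A's backward loop invariant
theorem loopA_inv (rival : String) (m : Nat) (hm : m ≤ rival.toList.length) :
    ∀ k, k ≤ m →
      (PySem.List.pyRange ((k : Int) - 1) (-1) (-1)).foldl (longliveDrizzyStep rival)
        (List.replicate k [0, 0, 0] ++ sfx ((rival.toList.take m).drop k))
      = sfx (rival.toList.take m) := by
  intro k
  induction k with
  | zero =>
    intro _
    rw [PySem.List.pyRange_neg_one_eq_nil (by norm_num)]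
    simp
  | succ j ih =>
    intro hk
    rw [show ((j + 1 : Nat) : Int) - 1 = (j : Int) by omega]
    rw [PySem.List.pyRange_neg_one_cons (by omega)]
    rw [List.foldl_cons]
    have hjlen : j < (rival.toList.take m).length := by
      rw [List.length_take]; omega
    have hdrop : (rival.toList.take m).drop j
        = (rival.toList.take m)[j] :: (rival.toList.take m).drop (j + 1) :=
      (List.getElem_cons_drop (h := hjlen)).symm
    have hchar : (rival.toList.take m)[j] = rival.toList[j]'(by omega) := by
      simp [List.getElem_take]
    -- evaluate one step of the loop body
    have hstep : longliveDrizzyStep rival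
        (List.replicate (j + 1) [0, 0, 0] ++ sfx ((rival.toList.take m).drop (j + 1))) ((j : Int))
        = List.replicate j [0, 0, 0] ++ sfx ((rival.toList.take m).drop j) := by
      simp only [longliveDrizzyStep]
      have hget : PySem.List.pyGetD
          (List.replicate (j + 1) [0, 0, 0] ++ sfx ((rival.toList.take m).drop (j + 1))) ((j : Int) + 1) []
          = row3 ((rival.toList.take m).drop (j + 1)) := by
        have : ((j : Int) + 1) = ((j + 1 : Nat) : Int) := by push_cast; ring
        rw [this, PySem.List.pyGetD_natCast]
        rw [List.getD_eq_getElem?_getD, List.getElem?_append_right (by simp)]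
        simpa [← List.getD_eq_getElem?_getD] using sfx_getD_zero ((rival.toList.take m).drop (j + 1)) []
      rw [hget]
      have hch : (PySem.Str.pyGet? rival (j : Int)).getD ' ' = rival.toList[j]'(by omega) := by
        rw [PySem.Str.pyGet?_natCast, List.getElem?_eq_getElem (by omega)]
        rfl
      rw [hch]
      set c := rival.toList[j]'(by omega) with hc
      have hrow : (if c = 'a' then
            PySem.List.pySetD [PySem.List.pyGetD (row3 ((rival.toList.take m).drop (j+1))) 0 0,
              PySem.List.pyGetD (row3 ((rival.toList.take m).drop (j+1))) 1 0,
              PySem.List.pyGetD (row3 ((rival.toList.take m).drop (j+1))) 2 0] 0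
              (PySem.List.pyGetD [PySem.List.pyGetD (row3 ((rival.toList.take m).drop (j+1))) 0 0,
                PySem.List.pyGetD (row3 ((rival.toList.take m).drop (j+1))) 1 0,
                PySem.List.pyGetD (row3 ((rival.toList.take m).drop (j+1))) 2 0] 0 0 + 1)
          else if c = 'b' then
            PySem.List.pySetD [PySem.List.pyGetD (row3 ((rival.toList.take m).drop (j+1))) 0 0,
              PySem.List.pyGetD (row3 ((rival.toList.take m).drop (j+1))) 1 0,
              PySem.List.pyGetD (row3 ((rival.toList.take m).drop (j+1))) 2 0] 1
              (PySem.List.pyGetD [PySem.List.pyGetD (row3 ((rival.toList.take m).drop (j+1))) 0 0,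
                PySem.List.pyGetD (row3 ((rival.toList.take m).drop (j+1))) 1 0,
                PySem.List.pyGetD (row3 ((rival.toList.take m).drop (j+1))) 2 0] 1 0 + 1)
          else
            PySem.List.pySetD [PySem.List.pyGetD (row3 ((rival.toList.take m).drop (j+1))) 0 0,
              PySem.List.pyGetD (row3 ((rival.toList.take m).drop (j+1))) 1 0,
              PySem.List.pyGetD (row3 ((rival.toList.take m).drop (j+1))) 2 0] 2
              (PySem.List.pyGetD [PySem.List.pyGetD (row3 ((rival.toList.take m).drop (j+1))) 0 0,
                PySem.List.pyGetD (row3 ((rival.toList.take m).drop (j+1))) 1 0,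
                PySem.List.pyGetD (row3 ((rival.toList.take m).drop (j+1))) 2 0] 2 0 + 1))
          = row3 (c :: (rival.toList.take m).drop (j + 1)) := by
        rw [row3_cons]
        by_cases ha : c = 'a' <;> by_cases hb : c = 'b' <;>
          simp [ha, hb, row3, PySem.List.pySetD, PySem.List.pyGetD, PySem.List.pySet?,
            PySem.List.pyGet?, PySem.List.pyIdx?]
      rw [hrow]
      have hset : PySem.List.pySetD
          (List.replicate (j + 1) [0, 0, 0] ++ sfx ((rival.toList.take m).drop (j + 1))) ((j : Int))
          (row3 (c :: (rival.toList.take m).drop (j + 1)))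
          = List.replicate j [0, 0, 0] ++ sfx ((rival.toList.take m).drop j) := by
        rw [PySem.List.pySetD_natCast]
        rw [List.set_append_left _ _ (by simp)]
        rw [set_replicate_last]
        rw [hdrop, hchar, sfx_cons, List.append_assoc]
        simp
      exact hset
    rw [hstep]
    exact ih (by omega)

-- the counting fold of B
theorem totFold (X : List Char) (x y z : Int) :
    X.foldl (fun t ch => PySem.List.pySetD t (bIdx ch) (PySem.List.pyGetD t (bIdx ch) 0 + 1)) [x, y, z]
      = [x + cntA X, y + cntB X, z + cntC X] := by
  induction X generalizing x y z with
  | nil => simp [cntA, cntB, cntC]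
  | cons c cs ih =>
    rw [List.foldl_cons]
    have hstep : PySem.List.pySetD [x, y, z] (bIdx c) (PySem.List.pyGetD [x, y, z] (bIdx c) 0 + 1)
        = if c = 'a' then [x + 1, y, z] else if c = 'b' then [x, y + 1, z] else [x, y, z + 1] := by
      by_cases ha : c = 'a' <;> by_cases hb : c = 'b' <;>
        simp [ha, hb, bIdx, PySem.List.pySetD, PySem.List.pyGetD, PySem.List.pySet?,
          PySem.List.pyGet?, PySem.List.pyIdx?]
    rw [hstep]
    by_cases ha : c = 'a' <;> by_cases hb : c = 'b' <;>
      simp [ha, hb, ih, cntA, cntB, cntC] <;> omega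

-- the emitting fold of B
theorem outFold (X : List Char) (o : List (List Int)) :
    X.foldl (fun (st : List Int × List (List Int)) ch =>
        (PySem.List.pySetD st.1 (bIdx ch) (PySem.List.pyGetD st.1 (bIdx ch) 0 - 1), st.2 ++ [st.1]))
      (row3 X, o)
      = ([0, 0, 0], o ++ (sfx X).dropLast) := by
  induction X generalizing o with
  | nil => simp [row3, cntA, cntB, cntC, sfx_nil]
  | cons c cs ih =>
    rw [List.foldl_cons]
    have hdec : PySem.List.pySetD (row3 (c :: cs)) (bIdx c)
        (PySem.List.pyGetD (row3 (c :: cs)) (bIdx c) 0 - 1) = row3 cs := by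
      rw [row3_cons]
      by_cases ha : c = 'a' <;> by_cases hb : c = 'b' <;>
        simp [ha, hb, bIdx, row3, PySem.List.pySetD, PySem.List.pyGetD, PySem.List.pySet?,
          PySem.List.pyGet?, PySem.List.pyIdx?]
    rw [show ((PySem.List.pySetD (row3 (c :: cs)) (bIdx c)
        (PySem.List.pyGetD (row3 (c :: cs)) (bIdx c) 0 - 1), o ++ [row3 (c :: cs)]))
        = (row3 cs, o ++ [row3 (c :: cs)]) from by rw [hdec]]
    rw [ih]
    rw [sfx_cons]
    have : sfx cs ≠ [] := by cases cs <;> simp [sfx]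
    simp [List.dropLast_cons_of_ne_nil this]

theorem sfx_dropLast_append (L : List Char) : (sfx L).dropLast ++ [[0, 0, 0]] = sfx L := by
  induction L with
  | nil => simp [sfx_nil]
  | cons c cs ih =>
    rw [sfx_cons]
    have : sfx cs ≠ [] := by cases cs <;> simp [sfx]
    rw [List.dropLast_cons_of_ne_nil this]
    simp [ih]

-- ===== VERDICT (by name: the statement is the Claim_ definition above) =====
theorem longliveDrizzy_spec : Claim_equal_longliveDrizzy := by
  intro n rival _hdom hpre
  unfold Spec_longliveDrizzy longliveDrizzy longliveDrizzy_alt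
  by_cases hneg : n < 0
  · rw [PySem.List.pyRange_one_eq_nil (by omega), PySem.List.pyRange_neg_one_eq_nil (by omega)]
    simp [hneg]
  · rw [Int.not_lt] at hneg
    have hlen : n ≤ (rival.toList.length : Int) := by
      simpa [PySem.Str.len_eq] using hpre
    set m := n.toNat with hmdef
    have hmn : (m : Int) = n := Int.toNat_of_nonneg hneg
    have hm : m ≤ rival.toList.length := by omega
    -- A side
    have hbuild : (PySem.List.pyRange 0 (n + 1) 1).foldl (fun acc _ => acc ++ [[0, 0, 0]]) []
        = List.replicate (m + 1) ([0, 0, 0] : List Int) := by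
      rw [PySem.List.foldl_append_singleton_eq_map (fun _ => ([0, 0, 0] : List Int))]
      rw [List.nil_append, List.map_const', PySem.List.length_pyRange_one]
      congr 1
      omega
    have hA : (PySem.List.pyRange (n - 1) (-1) (-1)).foldl (longliveDrizzyStep rival)
        (List.replicate (m + 1) ([0, 0, 0] : List Int)) = sfx (rival.toList.take m) := by
      have h0 := loopA_inv rival m hm m le_rfl
      rw [List.drop_take, Nat.sub_self, List.take_zero] at h0
      rw [sfx_nil] at h0
      have hrepl : List.replicate m ([0,0,0] : List Int) ++ [[0,0,0]] = List.replicate (m+1) [0,0,0] := by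
        simp [List.replicate_succ']
      rw [hrepl] at h0
      rw [show n - 1 = (m : Int) - 1 by omega]
      exact h0
    -- B side
    have hpre' : PySem.List.slice rival.toList none (some n) = rival.toList.take m :=
      PySem.List.slice_to rival.toList hneg
    have htot := totFold (rival.toList.take m) 0 0 0
    simp only [zero_add] at htot
    rw [show [cntA (rival.toList.take m), cntB (rival.toList.take m), cntC (rival.toList.take m)]
        = row3 (rival.toList.take m) from rfl] at htot
    have hout := outFold (rival.toList.take m) []
    simp only [if_neg (show ¬ n < 0 by omega), hpre', htot, hout, hbuild, hA, List.nil_append]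
    rw [sfx_dropLast_append]
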